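-- pv_equiv track=rewrite | github.com/avship/pyGulp | pyGulpModules/htmlTemplates.py | templatePathGetter
-- ===== SOURCE A (Python) =====
-- def templatePathGetter(testString:str):
--     try:
--         result = []
--         indAt = testString.index('@')
--         while True:
--             frmPath = testString.index("'", indAt)+1
--             toPath = testString.index("'", frmPath)
--             result.append(testString[frmPath:toPath])
--             indAt = testString.index('@', toPath+1)
--     except Exception as err:
--         pass
--     finally:
--         return result
-- ===== SOURCE B (Python) =====
-- import re
--
-- _PATH_RE = re.compile(r"@[^']*'([^']*)'")
--
-- def templatePathGetter(testString: str):
--     try: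
--         return _PATH_RE.findall(testString)
--     except Exception:
--         return []
-- ===== Notes on version B (the rewrite author's own statement) =====
-- stated objective: idiomatic
-- what changed: Replaced the manual while-loop that repeatedly advances str.index positions (exiting via a caught exception) with a single compiled-regex findall whose pattern matches an at-sign marker, skips to the first single quote and captures up to the closing quote.
import Mathlib
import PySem

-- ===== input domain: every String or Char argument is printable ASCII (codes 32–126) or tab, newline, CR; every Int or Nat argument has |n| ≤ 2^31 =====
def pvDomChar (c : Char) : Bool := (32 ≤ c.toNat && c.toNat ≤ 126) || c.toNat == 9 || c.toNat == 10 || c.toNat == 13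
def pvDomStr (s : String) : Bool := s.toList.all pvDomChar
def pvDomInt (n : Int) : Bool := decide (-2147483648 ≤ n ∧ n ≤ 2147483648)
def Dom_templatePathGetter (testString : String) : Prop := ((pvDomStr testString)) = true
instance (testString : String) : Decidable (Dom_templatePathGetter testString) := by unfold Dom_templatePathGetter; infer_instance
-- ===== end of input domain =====

-- B replaces A's manual index-advancing str.index loop with a single regex findall
-- (re.findall(r"@[^']*'([^']*)'", s)), ported here as the equivalent one-pass character
-- scanner for that fixed pattern; objective: idiomatic, same behaviour.

-- ===== PORT A =====
-- A's while-True loop advances `indAt` via str.index and exits through the caught ValueError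
-- (findFrom returning -1 here); each iteration moves `indAt` forward, so `cs.length + 1` fuel
-- is never exhausted (the equivalence proof below never reaches the fuel-0 branch).
def pvA_loop (cs : List Char) (indAt : Int) (result : List String) : Nat → List String
  | 0 => result
  | fuel + 1 =>
    -- frmPath = testString.index("'", indAt) + 1   (ValueError → except: return result)
    let frm0 := PySem.Chars.findFrom cs ['\''] indAt none
    if frm0 = -1 then result
    else
      -- toPath = testString.index("'", frmPath)
      let toPath := PySem.Chars.findFrom cs ['\''] (frm0 + 1) none
      if toPath = -1 then result
      else
        -- result.append(testString[frmPath:toPath])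
        let result' := result ++ [String.mk (PySem.List.slice cs (some (frm0 + 1)) (some toPath))]
        -- indAt = testString.index('@', toPath + 1)
        let indAt' := PySem.Chars.findFrom cs ['@'] (toPath + 1) none
        if indAt' = -1 then result' else pvA_loop cs indAt' result' fuel

def templatePathGetter (testString : String) : List String :=
  let cs := testString.toList
  -- indAt = testString.index('@'); a ValueError here leaves result = []
  let indAt := PySem.Chars.find cs ['@']
  if indAt = -1 then []
  else pvA_loop cs indAt [] (cs.length + 1)

-- ===== PORT B =====
-- re.findall(r"@[^']*'([^']*)'", s) as a direct scanner: advance to the next '@' (the only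
-- possible match start), take [^']*' (skip to the first quote), capture ([^']*) up to the
-- closing quote, resume after it.  When either quote is missing, no later start position can
-- match either (at most one quote remains after any later '@'), so findall is finished —
-- exactly re's behaviour for this fixed pattern.
def pvRe_findall (cs : List Char) : List String :=
  match h1 : cs.dropWhile (fun x => x ≠ '@') with
  | [] => []
  | _ :: rest =>
    match h2 : rest.dropWhile (fun x => x ≠ '\'') with
    | [] => []
    | _ :: rest2 =>
      match h3 : rest2.dropWhile (fun x => x ≠ '\'') with
      | [] => []
      | _ :: rest3 => String.mk (rest2.takeWhile (fun x => x ≠ '\'')) :: pvRe_findall rest3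
termination_by cs.length
decreasing_by
  have e1 : (cs.dropWhile (fun x => x ≠ '@')).length ≤ cs.length := (List.dropWhile_sublist _).length_le
  have e2 : (rest.dropWhile (fun x => x ≠ '\'')).length ≤ rest.length := (List.dropWhile_sublist _).length_le
  have e3 : (rest2.dropWhile (fun x => x ≠ '\'')).length ≤ rest2.length := (List.dropWhile_sublist _).length_le
  rw [h1] at e1; rw [h2] at e2; rw [h3] at e3
  simp at e1 e2 e3
  omega

def templatePathGetter_alt (testString : String) : List String :=
  pvRe_findall testString.toList

-- ===== PRECONDITION & SPEC =====
def Spec_templatePathGetter (testString : String) (out : List String) : Prop := out = templatePathGetter_alt testString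
instance (testString : String) (out : List String) : Decidable (Spec_templatePathGetter testString out) := by unfold Spec_templatePathGetter; infer_instance

-- ===== CLAIM (what is proved, stated in full; the proofs are below) =====
def Claim_equal_templatePathGetter : Prop := ∀ (testString : String), Dom_templatePathGetter testString → Spec_templatePathGetter testString (templatePathGetter testString)

-- ===== LEMMAS AND PROOFS =====

theorem drop_len_takeWhile (p : Char → Bool) (l : List Char) : l.drop (l.takeWhile p).length = l.dropWhile p := by
  induction l with
  | nil => rfl
  | cons a t ih => by_cases h : p a <;> simp [h, ih]

theorem take_len_takeWhile (p : Char → Bool) (l : List Char) : l.take (l.takeWhile p).length = l.takeWhile p := by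
  induction l with
  | nil => rfl
  | cons a t ih => by_cases h : p a <;> simp [h, ih]

theorem head?_dropWhile_ne (c : Char) (l : List Char) (h : c ∈ l) :
    (l.dropWhile (fun x => x ≠ c)).head? = some c := by
  induction l with
  | nil => simp at h
  | cons a t ih =>
    by_cases ha : a = c
    · simp [ha]
    · have hct : c ∈ t := by
        cases h with
        | head => exact absurd rfl ha
        | tail _ ht => exact ht
      simpa [ha] using ih hct

theorem dropWhile_ne_eq_nil (c : Char) (l : List Char) (h : c ∉ l) :
    l.dropWhile (fun x => x ≠ c) = [] := by
  rw [List.dropWhile_eq_nil_iff]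
  intro x hx
  simp
  rintro rfl
  exact h hx

theorem find_single_mem (d : List Char) (c : Char) (h : c ∈ d) :
    PySem.Chars.find d [c] = ((d.takeWhile (fun x => x ≠ c)).length : Int) := by
  have hinf : [c] <:+: d := (List.singleton_infix_iff c d).mpr h
  have hne : PySem.Chars.find d [c] ≠ -1 := (PySem.Chars.find_ne_neg_one_iff d [c]).mpr hinf
  have hpos : 0 ≤ PySem.Chars.find d [c] := (PySem.Chars.find_nonneg_iff d [c]).mpr hinf
  obtain ⟨hpre, hmin⟩ := PySem.Chars.find_spec hpos
  set n := (PySem.Chars.find d [c]).toNat with hn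
  set t := (d.takeWhile (fun x => x ≠ c)).length with ht
  have hlen : t ≤ d.length := by
    have := (List.takeWhile_sublist (l := d) (fun y : Char => y ≠ c)).length_le
    omega
  have hpt : [c] <+: d.drop t := by
    rw [ht, drop_len_takeWhile]
    have hh := head?_dropWhile_ne c d h
    cases he : d.dropWhile (fun x => x ≠ c) with
    | nil => rw [he] at hh; exact absurd hh (by simp)
    | cons b l => rw [he] at hh; simp at hh; exact ⟨l, by simp [hh]⟩
  have h1 : n ≤ t := by
    by_contra hlt
    exact hmin t (by omega) hpt
  have h2 : t ≤ n := by
    by_contra hlt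
    have hnlt : n < t := by omega
    have hdn : d[n]? = some c := by
      rcases hpre with ⟨s, hs⟩
      have hh : (d.drop n).head? = some c := by rw [← hs]; rfl
      rwa [List.head?_drop] at hh
    have hmem : d[n]'(by omega) ∈ d.takeWhile (fun y => y ≠ c) := by
      rw [← take_len_takeWhile (fun y => y ≠ c) d, ← ht]
      have hg : (d.take t)[n]'(by simp; omega) = d[n]'(by omega) := List.getElem_take
      rw [← hg]
      exact List.getElem_mem _
    have hne' : d[n]'(by omega) ≠ c := by simpa using List.mem_takeWhile_imp hmem
    rw [List.getElem?_eq_getElem (by omega)] at hdn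
    simp only [Option.some.injEq] at hdn
    exact hne' hdn
  omega

theorem find_single_not_mem (d : List Char) (c : Char) (h : c ∉ d) :
    PySem.Chars.find d [c] = -1 := by
  rw [PySem.Chars.find_eq_neg_one_iff, List.singleton_infix_iff]
  exact h

theorem findFrom_single (cs : List Char) (c : Char) (k : Nat) (hk : k ≤ cs.length) :
    PySem.Chars.findFrom cs [c] (k : Int) none =
      if c ∈ cs.drop k then (((k + ((cs.drop k).takeWhile (fun x => x ≠ c)).length : Nat)) : Int) else -1 := by
  rw [PySem.Chars.findFrom_natCast cs [c] k hk]
  by_cases h : c ∈ cs.drop k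
  · rw [find_single_mem _ _ h]
    have hnn : (0:Int) ≤ (((cs.drop k).takeWhile (fun x => x ≠ c)).length : Int) := Int.natCast_nonneg _
    simp only [h, if_true]
    rw [if_neg (by omega)]
    push_cast
    ring
  · rw [find_single_not_mem _ _ h]
    simp [h]

theorem pvRe_findall_restart (l : List Char) :
    pvRe_findall l = pvRe_findall (l.dropWhile (fun x => x ≠ '@')) := by
  conv_lhs => rw [pvRe_findall]
  conv_rhs => rw [pvRe_findall]
  rw [List.dropWhile_idempotent]

theorem pvRe_findall_no_at (l : List Char) (h : l.dropWhile (fun x => x ≠ '@') = []) :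
    pvRe_findall l = [] := by
  rw [pvRe_findall]
  split
  · rfl
  · rename_i heq
    rw [h] at heq
    cases heq

theorem pvRe_findall_at1 (r : List Char) (h : r.dropWhile (fun x => x ≠ '\'') = []) :
    pvRe_findall ('@' :: r) = [] := by
  rw [pvRe_findall]
  split
  · rename_i heq; cases heq
  · rename_i head rest heq
    cases heq
    split
    · rfl
    · rename_i heq2
      rw [h] at heq2
      cases heq2

theorem pvRe_findall_at2 (r : List Char) (c : Char) (rest2 : List Char)
    (h : r.dropWhile (fun x => x ≠ '\'') = c :: rest2)
    (h2 : rest2.dropWhile (fun x => x ≠ '\'') = []) :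
    pvRe_findall ('@' :: r) = [] := by
  rw [pvRe_findall]
  split
  · rename_i heq; cases heq
  · rename_i head rest heq
    cases heq
    split
    · rfl
    · rename_i heq2
      rw [h] at heq2
      cases heq2
      split
      · rfl
      · rename_i heq3
        rw [h2] at heq3
        cases heq3

theorem pvRe_findall_at3 (r : List Char) (c c' : Char) (rest2 rest3 : List Char)
    (h : r.dropWhile (fun x => x ≠ '\'') = c :: rest2)
    (h2 : rest2.dropWhile (fun x => x ≠ '\'') = c' :: rest3) :
    pvRe_findall ('@' :: r) = String.mk (rest2.takeWhile (fun x => x ≠ '\'')) :: pvRe_findall rest3 := by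
  rw [pvRe_findall]
  split
  · rename_i heq; cases heq
  · rename_i head rest heq
    cases heq
    split
    · rename_i heq2; rw [h] at heq2; cases heq2
    · rename_i heq2
      rw [h] at heq2
      cases heq2
      split
      · rename_i heq3; rw [h2] at heq3; cases heq3
      · rename_i heq3
        rw [h2] at heq3
        cases heq3
        rfl

theorem pv_loop_eq (cs : List Char) (fuel : Nat) :
    ∀ (p : Nat) (acc : List String), cs.length - p < fuel → (cs.drop p).head? = some '@' →
      pvA_loop cs (p : Int) acc fuel = acc ++ pvRe_findall (cs.drop p) := by
  induction fuel with
  | zero =>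
    intro p acc hf hhead
    have hnil : cs.drop p ≠ [] := by intro he; rw [he] at hhead; cases hhead
    have hplen : p < cs.length := by
      by_contra hge; push Not at hge; exact hnil (List.drop_eq_nil_of_le hge)
    omega
  | succ f ih =>
    intro p acc hf hhead
    have hnil : cs.drop p ≠ [] := by intro he; rw [he] at hhead; cases hhead
    have hplen : p < cs.length := by
      by_contra hge; push Not at hge; exact hnil (List.drop_eq_nil_of_le hge)
    obtain ⟨r, hdp⟩ : ∃ r, cs.drop p = '@' :: r := by
      cases hdpc : cs.drop p with
      | nil => exact absurd hdpc hnil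
      | cons a r =>
        rw [hdpc] at hhead
        simp at hhead
        exact ⟨r, by rw [hhead]⟩
    simp only [pvA_loop]
    rw [findFrom_single cs '\'' p (le_of_lt hplen)]
    by_cases hq1 : '\'' ∈ cs.drop p
    · simp only [hq1, if_true]
      set t1 := ((cs.drop p).takeWhile (fun x => x ≠ '\'')).length with ht1
      rw [if_neg (by omega : ¬ ((p + t1 : Nat) : Int) = -1)]
      have hdq1 : cs.drop (p + t1) = (cs.drop p).dropWhile (fun x => x ≠ '\'') := by
        rw [← List.drop_drop]; exact drop_len_takeWhile _ _
      have hh1 : (cs.drop (p + t1)).head? = some '\'' := by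
        rw [hdq1]; exact head?_dropWhile_ne _ _ hq1
      have hq1len : p + t1 < cs.length := by
        by_contra hge; push Not at hge
        rw [List.drop_eq_nil_of_le hge] at hh1; cases hh1
      obtain ⟨rest2, hdq1c⟩ : ∃ rest2, cs.drop (p + t1) = '\'' :: rest2 := by
        cases hc : cs.drop (p + t1) with
        | nil => rw [hc] at hh1; cases hh1
        | cons a rest2 => rw [hc] at hh1; simp at hh1; exact ⟨rest2, by rw [hh1]⟩
      have hrest2 : cs.drop (p + t1 + 1) = rest2 := by
        rw [← List.tail_drop, hdq1c]
        rfl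
      have hB2 : r.dropWhile (fun x => x ≠ '\'') = '\'' :: rest2 := by
        have hstep : (cs.drop p).dropWhile (fun x => x ≠ '\'') = r.dropWhile (fun x => x ≠ '\'') := by
          rw [hdp]
          simp
        rw [← hstep, ← hdq1, hdq1c]
      have hc1 : (((p + t1 : Nat) : Int) + 1) = ((p + t1 + 1 : Nat) : Int) := by push_cast; ring
      rw [hc1, findFrom_single cs '\'' (p + t1 + 1) (by omega)]
      by_cases hq2 : '\'' ∈ cs.drop (p + t1 + 1)
      · simp only [hq2, if_true]
        set t2 := ((cs.drop (p + t1 + 1)).takeWhile (fun x => x ≠ '\'')).length with ht2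
        rw [if_neg (by omega : ¬ ((p + t1 + 1 + t2 : Nat) : Int) = -1)]
        have hslice : PySem.List.slice cs (some ((p + t1 + 1 : Nat) : Int)) (some ((p + t1 + 1 + t2 : Nat) : Int))
            = rest2.takeWhile (fun x => x ≠ '\'') := by
          rw [PySem.List.slice_natCast]
          have harith : p + t1 + 1 + t2 - (p + t1 + 1) = t2 := by omega
          rw [harith]
          have ht2' : t2 = (rest2.takeWhile (fun x => x ≠ '\'')).length := by
            rw [ht2, hrest2]
          rw [hrest2, ht2']
          exact take_len_takeWhile _ _
        have hdq2 : cs.drop (p + t1 + 1 + t2) = (cs.drop (p + t1 + 1)).dropWhile (fun x => x ≠ '\'') := by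
          rw [← List.drop_drop]; exact drop_len_takeWhile _ _
        have hh2 : (cs.drop (p + t1 + 1 + t2)).head? = some '\'' := by
          rw [hdq2]; exact head?_dropWhile_ne _ _ hq2
        have hq2len : p + t1 + 1 + t2 < cs.length := by
          by_contra hge; push Not at hge
          rw [List.drop_eq_nil_of_le hge] at hh2; cases hh2
        obtain ⟨rest3, hdq2c⟩ : ∃ rest3, cs.drop (p + t1 + 1 + t2) = '\'' :: rest3 := by
          cases hc : cs.drop (p + t1 + 1 + t2) with
          | nil => rw [hc] at hh2; cases hh2
          | cons a rest3 => rw [hc] at hh2; simp at hh2; exact ⟨rest3, by rw [hh2]⟩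
        have hrest3 : cs.drop (p + t1 + 1 + t2 + 1) = rest3 := by
          rw [← List.tail_drop, hdq2c]
          rfl
        have hB3 : rest2.dropWhile (fun x => x ≠ '\'') = '\'' :: rest3 := by
          rw [← hrest2, ← hdq2, hdq2c]
        have hc2 : (((p + t1 + 1 + t2 : Nat) : Int) + 1) = ((p + t1 + 1 + t2 + 1 : Nat) : Int) := by push_cast; ring
        rw [hc2, findFrom_single cs '@' (p + t1 + 1 + t2 + 1) (by omega)]
        by_cases hat : '@' ∈ cs.drop (p + t1 + 1 + t2 + 1)
        · simp only [hat, if_true]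
          set t3 := ((cs.drop (p + t1 + 1 + t2 + 1)).takeWhile (fun x => x ≠ '@')).length with ht3
          rw [if_neg (by omega : ¬ ((p + t1 + 1 + t2 + 1 + t3 : Nat) : Int) = -1)]
          have hdp' : cs.drop (p + t1 + 1 + t2 + 1 + t3) = (cs.drop (p + t1 + 1 + t2 + 1)).dropWhile (fun x => x ≠ '@') := by
            rw [← List.drop_drop]; exact drop_len_takeWhile _ _
          have hhead' : (cs.drop (p + t1 + 1 + t2 + 1 + t3)).head? = some '@' := by
            rw [hdp']; exact head?_dropWhile_ne _ _ hat
          rw [ih (p + t1 + 1 + t2 + 1 + t3) _ (by omega) hhead']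
          rw [hdp, pvRe_findall_at3 r '\'' '\'' rest2 rest3 hB2 hB3]
          rw [pvRe_findall_restart rest3, ← hrest3, ← hdp', hslice]
          simp
        · simp only [hat, if_false]
          rw [if_pos (by trivial)]
          rw [hdp, pvRe_findall_at3 r '\'' '\'' rest2 rest3 hB2 hB3]
          have hno : rest3.dropWhile (fun x => x ≠ '@') = [] := by
            apply dropWhile_ne_eq_nil
            intro hmem
            exact hat (by rw [hrest3]; exact hmem)
          rw [pvRe_findall_restart rest3, hno, pvRe_findall_no_at [] rfl, hslice]
      · simp only [hq2, if_false]
        rw [if_pos (by trivial)]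
        rw [hdp]
        have hno2 : rest2.dropWhile (fun x => x ≠ '\'') = [] := by
          apply dropWhile_ne_eq_nil
          intro hmem
          exact hq2 (by rw [hrest2]; exact hmem)
        rw [pvRe_findall_at2 r '\'' rest2 hB2 hno2]
        simp
    · simp only [hq1, if_false]
      rw [if_pos (by trivial)]
      rw [hdp]
      have hnoq : r.dropWhile (fun x => x ≠ '\'') = [] := by
        apply dropWhile_ne_eq_nil
        intro hmem
        exact hq1 (by rw [hdp]; exact List.mem_cons_of_mem _ hmem)
      rw [pvRe_findall_at1 r hnoq]
      simp

-- ===== VERDICT (by name: the statement is the Claim_ definition above) =====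
theorem templatePathGetter_spec : Claim_equal_templatePathGetter := by
  intro s _
  unfold Spec_templatePathGetter templatePathGetter templatePathGetter_alt
  set cs := s.toList with hcs
  show (if PySem.Chars.find cs ['@'] = -1 then [] else pvA_loop cs (PySem.Chars.find cs ['@']) [] (cs.length + 1)) = pvRe_findall cs
  by_cases h : '@' ∈ cs
  · rw [find_single_mem cs '@' h]
    have hne : ((cs.takeWhile (fun x => x ≠ '@')).length : Int) ≠ -1 := by
      have := Int.natCast_nonneg (cs.takeWhile (fun x => x ≠ '@')).length
      omega
    rw [if_neg hne]
    set p0 := (cs.takeWhile (fun x => x ≠ '@')).length with hp0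
    have hdrop : cs.drop p0 = cs.dropWhile (fun x => x ≠ '@') := drop_len_takeWhile _ cs
    have hhead : (cs.drop p0).head? = some '@' := by rw [hdrop]; exact head?_dropWhile_ne '@' cs h
    have hp0len : p0 ≤ cs.length := (List.takeWhile_sublist _).length_le
    have := pv_loop_eq cs (cs.length + 1) p0 [] (by omega) hhead
    rw [this, pvRe_findall_restart cs, ← hdrop]
    simp
  · rw [find_single_not_mem cs '@' h, if_pos rfl]
    exact (pvRe_findall_no_at cs (dropWhile_ne_eq_nil '@' cs h)).symm
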